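-- pv_equiv track=rewrite | github.com/frozjeee/algorithms | vowels.py | foo
-- ===== SOURCE A (Python) =====
-- def foo(n):
--     count = 0
--     mnozh = 0
--     for i in range(n + 1):
--         count += mnozh      # 0 | 5  | 15 | 35
--         if i == 0:
--             mnozh += 5
--         else:
--             mnozh += 5 * i    # 5 | 10 | 20 | 35
--     return count
-- ===== SOURCE B (Python) =====
-- def foo(n):
--     # Closed form: sum_{i=1}^{n} (5 + 5*i*(i-1)/2) = 5n + 5*n*(n-1)*(n+1)/6
--     if n < 0:
--         return 0
--     return 5 * n + 5 * n * (n - 1) * (n + 1) // 6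
-- ===== Notes on version B (the rewrite author's own statement) =====
-- stated objective: faster
-- what changed: Replaced the O(n) accumulation loop by the closed-form cubic polynomial 5n + 5n(n-1)(n+1)/6 (0 for negative n).
import Mathlib
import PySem

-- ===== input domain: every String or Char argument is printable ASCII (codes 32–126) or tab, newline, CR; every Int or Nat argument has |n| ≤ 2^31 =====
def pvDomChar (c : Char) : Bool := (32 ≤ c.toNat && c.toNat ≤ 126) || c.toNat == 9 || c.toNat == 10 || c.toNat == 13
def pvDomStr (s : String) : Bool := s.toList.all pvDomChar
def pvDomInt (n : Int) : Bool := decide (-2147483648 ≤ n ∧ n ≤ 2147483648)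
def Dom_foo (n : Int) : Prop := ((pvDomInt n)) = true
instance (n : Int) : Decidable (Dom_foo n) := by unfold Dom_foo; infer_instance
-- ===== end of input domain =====

-- ===== PORT A =====
-- literal port of A: fold over range(n+1) carrying (count, mnozh)
def foo (n : Int) : Int :=
  ((PySem.List.pyRange 0 (n + 1) 1).foldl
    (fun (s : Int × Int) i =>
      (s.1 + s.2, if i = 0 then s.2 + 5 else s.2 + 5 * i))
    (0, 0)).1

-- ===== PORT B =====
-- B: closed-form polynomial; O(1) instead of A's O(n) loop
def foo_alt (n : Int) : Int :=
  if n < 0 then 0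
  else 5 * n + PySem.Int.floordiv (5 * n * (n - 1) * (n + 1)) 6

-- ===== PRECONDITION & SPEC =====
def Spec_foo (n : Int) (out : Int) : Prop := out = foo_alt n
instance (n : Int) (out : Int) : Decidable (Spec_foo n out) := by unfold Spec_foo; infer_instance

-- ===== CLAIM (what is proved, stated in full; the proofs are below) =====
def Claim_equal_foo : Prop := ∀ (n : Int), Dom_foo n → Spec_foo n (foo n)

-- ===== LEMMAS AND PROOFS =====

-- the loop state after processing i = 0 .. m, as a recursive pair
def fooAux : Nat → Int × Int
  | 0 => (0, 5)
  | m + 1 => ((fooAux m).1 + (fooAux m).2, (fooAux m).2 + 5 * ((m : Int) + 1))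

lemma foo_loop_eq (m : Nat) :
    ((PySem.List.pyRange 0 ((m : Int) + 1) 1).foldl
      (fun (s : Int × Int) i =>
        (s.1 + s.2, if i = 0 then s.2 + 5 else s.2 + 5 * i))
      (0, 0)) = fooAux m := by
  induction m with
  | zero => decide
  | succ m ih =>
      have h : ((m : Int) + 1) + 1 = (((m : Int) + 1) + 1) := rfl
      rw [show ((m + 1 : Nat) : Int) + 1 = ((m : Int) + 1) + 1 by push_cast; ring,
          PySem.List.pyRange_one_succ_right (by positivity)]
      rw [List.foldl_append, ih]
      simp [fooAux]
      omega

lemma fooAux_closed (m : Nat) :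
    6 * (fooAux m).1 = 30 * m + 5 * m * ((m : Int) + 1) * ((m : Int) - 1) ∧
    2 * (fooAux m).2 = 10 + 5 * m * ((m : Int) + 1) := by
  induction m with
  | zero => decide
  | succ m ih =>
      obtain ⟨h1, h2⟩ := ih
      constructor
      · simp only [fooAux]
        push_cast at *
        linear_combination h1 + 3 * h2
      · simp only [fooAux]
        push_cast at *
        linear_combination h2

-- ===== VERDICT (by name: the statement is the Claim_ definition above) =====
theorem foo_spec : Claim_equal_foo := by
  intro n _
  unfold Spec_foo foo foo_alt
  by_cases hn : n < 0
  · rw [PySem.List.pyRange_one_eq_nil (by omega)]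
    simp [hn]
  · push Not at hn
    obtain ⟨m, rfl⟩ := Int.eq_ofNat_of_zero_le hn
    rw [foo_loop_eq m]
    obtain ⟨h1, h2⟩ := fooAux_closed m
    have hdvd : 5 * (m : Int) * ((m : Int) - 1) * ((m : Int) + 1)
        = 6 * ((fooAux m).1 - 5 * m) := by linear_combination -h1
    rw [if_neg (by omega), hdvd, PySem.Int.floordiv]
    rw [Int.mul_fdiv_cancel_left _ (by norm_num)]
    ring
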